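-- pv_equiv track=rewrite | github.com/DashaZar/lab2 | Laba2/modul3/python.py | sum_digits_divisible_by_3
-- ===== SOURCE A (Python) =====
-- def sum_digits_divisible_by_3(num):
--     sum = 0
--     num = abs(num)
--     while num > 0:
--         digit = num % 10
--         if digit % 3 == 0 and digit != 0:
--             sum += digit
--         num = num // 10
--     return sum
-- ===== SOURCE B (Python) =====
-- def sum_digits_divisible_by_3(num):
--     s = str(abs(num))
--     return 3 * s.count('3') + 6 * s.count('6') + 9 * s.count('9')
-- ===== Notes on version B (the rewrite author's own statement) =====
-- stated objective: alternative
-- what changed: Replaces the digit-peeling while-loop (per-digit modulus test and accumulator) with a weighted character count: the only digits that can contribute are 3, 6 and 9, so the result is 3*count('3') + 6*count('6') + 9*count('9') over the decimal string of abs(num); no per-digit divisibility test or accumulation loop remains.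
import Mathlib
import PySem

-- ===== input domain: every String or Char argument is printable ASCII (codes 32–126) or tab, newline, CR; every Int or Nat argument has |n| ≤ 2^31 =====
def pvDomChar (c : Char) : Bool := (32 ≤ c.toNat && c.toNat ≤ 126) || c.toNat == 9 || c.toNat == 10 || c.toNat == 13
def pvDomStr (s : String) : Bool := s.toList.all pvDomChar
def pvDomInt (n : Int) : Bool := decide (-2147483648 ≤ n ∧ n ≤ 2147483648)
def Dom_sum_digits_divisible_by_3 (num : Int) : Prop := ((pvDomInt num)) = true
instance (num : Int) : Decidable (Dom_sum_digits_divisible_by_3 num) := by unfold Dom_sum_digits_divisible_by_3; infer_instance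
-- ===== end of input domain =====

-- B replaces A's digit-peeling while-loop (per-digit modulus test and accumulator) by a weighted
-- character count over str(abs(num)): only 3, 6 and 9 can contribute, so the result is
-- 3*count('3') + 6*count('6') + 9*count('9'); same cost, no per-digit loop.

-- ===== PORT A =====
-- the while-loop of A, peeling digits with Python's modulus and floor division (PySem semantics)
def pvLoopA (num : Int) (sum : Int) : Int :=
  if _h : num > 0 then
    let digit := PySem.Int.mod num 10
    let sum := if PySem.Int.mod digit 3 == 0 && digit != 0 then sum + digit else sum
    pvLoopA (PySem.Int.floordiv num 10) sum
  else sum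
termination_by num.toNat
decreasing_by
  rw [PySem.Int.floordiv_eq_ediv_of_pos (by norm_num)]
  omega

def sum_digits_divisible_by_3 (num : Int) : Int := pvLoopA |num| 0

-- ===== PORT B =====
-- s = str(abs(num)); return 3*s.count('3') + 6*s.count('6') + 9*s.count('9')
def sum_digits_divisible_by_3_alt (num : Int) : Int :=
  let s := PySem.Int.toChars |num|
  3 * (PySem.Chars.count s ['3'] : Int) + 6 * (PySem.Chars.count s ['6'] : Int)
    + 9 * (PySem.Chars.count s ['9'] : Int)

-- ===== PRECONDITION & SPEC =====
def Spec_sum_digits_divisible_by_3 (num : Int) (out : Int) : Prop := out = sum_digits_divisible_by_3_alt num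
instance (num : Int) (out : Int) : Decidable (Spec_sum_digits_divisible_by_3 num out) := by unfold Spec_sum_digits_divisible_by_3; infer_instance

-- ===== CLAIM (what is proved, stated in full; the proofs are below) =====
def Claim_equal_sum_digits_divisible_by_3 : Prop := ∀ (num : Int), Dom_sum_digits_divisible_by_3 num → Spec_sum_digits_divisible_by_3 num (sum_digits_divisible_by_3 num)

-- ===== LEMMAS AND PROOFS =====

-- the common specification: sum of the base-10 digits of n that are nonzero multiples of 3
def pvP (d : Nat) : Bool := d % 3 == 0 && d != 0
def pvS (n : Nat) : Int := (((Nat.digits 10 n).filter pvP).sum : Nat)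

-- per-char contribution: 3/6/9 for the chars '3'/'6'/'9', 0 otherwise
def pvG (c : Char) : Int :=
  if c = '3' then 3 else if c = '6' then 6 else if c = '9' then 9 else 0

lemma pvS_zero : pvS 0 = 0 := by simp [pvS]

lemma pvS_step (n : Nat) (h : 0 < n) :
    pvS n = (if pvP (n % 10) then ((n % 10 : Nat) : Int) else 0) + pvS (n / 10) := by
  rw [pvS, Nat.digits_def' (by norm_num : (1:Nat) < 10) h, List.filter_cons]
  split <;> simp_all [pvS]

lemma pvG_digitChar (k : Nat) (h : k < 10) :
    pvG (Nat.digitChar k) = if pvP k then (k : Int) else 0 := by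
  interval_cases k <;> decide

-- the weighted char counts are exactly the sum of pvG over the string
lemma pvCounts (l : List Char) :
    3 * ((l.count '3' : Nat) : Int) + 6 * ((l.count '6' : Nat) : Int)
      + 9 * ((l.count '9' : Nat) : Int) = (l.map pvG).sum := by
  induction l with
  | nil => simp
  | cons c t ih =>
    simp only [List.count_cons, List.map_cons, List.sum_cons]
    by_cases h3 : c = '3' <;> by_cases h6 : c = '6' <;> by_cases h9 : c = '9' <;>
      simp_all [pvG] <;> push_cast <;> omega

-- Chars.count with a single-char pattern counts occurrences of that char
lemma count_go_single (c : Char) : ∀ (fuel : Nat) (l : List Char) (acc : Nat), l.length ≤ fuel →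
    PySem.Chars.count.go [c] fuel l acc = acc + l.count c := by
  intro fuel
  induction fuel with
  | zero =>
    intro l acc h
    have : l = [] := List.eq_nil_of_length_eq_zero (Nat.le_zero.mp h)
    subst this
    simp [PySem.Chars.count.go]
  | succ fuel ih =>
    intro l acc h
    cases l with
    | nil => simp [PySem.Chars.count.go]
    | cons a t =>
      have ht : t.length ≤ fuel := by simpa using h
      rw [PySem.Chars.count.go]
      by_cases hc : (c == a) = true
      · obtain rfl : c = a := eq_of_beq hc
        simp only [List.isPrefixOf, BEq.rfl, Bool.true_and, if_true,
          List.length_singleton, List.drop_one, List.tail_cons]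
        rw [ih t (acc + 1) ht, List.count_cons]
        simp
        omega
      · simp only [List.isPrefixOf, hc, Bool.false_and]
        rw [ih t acc ht, List.count_cons]
        simp
        intro hh
        exact absurd (by simp [hh]) hc

lemma count_single (c : Char) (l : List Char) : PySem.Chars.count l [c] = l.count c := by
  rw [PySem.Chars.count]
  simp only [List.isEmpty_cons, if_false]
  rw [count_go_single c l.length l 0 le_rfl]
  simp

lemma core_sum (fuel : Nat) : ∀ (n : Nat) (l : List Char), n < 10 ^ fuel →
    ((Nat.toDigitsCore 10 fuel n l).map pvG).sum = pvS n + (l.map pvG).sum := by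
  induction fuel with
  | zero =>
    intro n l h
    interval_cases n
    simp [Nat.toDigitsCore, pvS_zero]
  | succ fuel ih =>
    intro n l h
    rw [Nat.toDigitsCore]
    by_cases h0 : n / 10 = 0
    · have hn : n < 10 := by omega
      rw [if_pos h0]
      rcases Nat.eq_zero_or_pos n with rfl | hpos
      · have hg : pvG (Nat.digitChar (0 % 10)) = 0 := by decide
        simp [hg, pvS_zero]
      · rw [List.map_cons, List.sum_cons, pvS_step n hpos, h0, pvS_zero,
          Nat.mod_eq_of_lt hn, pvG_digitChar n hn]
        ring
    · have hn : 0 < n := Nat.pos_of_ne_zero (fun hz => h0 (by simp [hz]))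
      have hlt : n / 10 < 10 ^ fuel := by
        rw [pow_succ] at h; exact Nat.div_lt_of_lt_mul (by omega)
      rw [if_neg h0, ih (n / 10) _ hlt, List.map_cons, List.sum_cons, pvS_step n hn,
        pvG_digitChar (n % 10) (Nat.mod_lt n (by norm_num))]
      ring

lemma pvCond_cast (k : Nat) (hk : k < 10) :
    (PySem.Int.mod (k : Int) 3 == 0 && (k : Int) != 0) = pvP k := by
  interval_cases k <;> decide

lemma loopA_eq (m : Nat) : ∀ acc : Int, pvLoopA (m : Int) acc = acc + pvS m := by
  induction m using Nat.strong_induction_on with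
  | _ m ih =>
    intro acc
    rw [pvLoopA]
    by_cases hm : (m : Int) > 0
    · have hmpos : 0 < m := by exact_mod_cast hm
      rw [dif_pos hm]
      have hmod : PySem.Int.mod (m : Int) 10 = ((m % 10 : Nat) : Int) := by
        rw [PySem.Int.mod_eq_emod_of_pos (by norm_num)]; omega
      have hdiv : PySem.Int.floordiv (m : Int) 10 = ((m / 10 : Nat) : Int) := by
        rw [PySem.Int.floordiv_eq_ediv_of_pos (by norm_num)]; omega
      have hcond : (PySem.Int.mod ((m % 10 : Nat) : Int) 3 == 0 && ((m % 10 : Nat) : Int) != 0)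
          = pvP (m % 10) := pvCond_cast (m % 10) (Nat.mod_lt m (by norm_num))
      simp only [hmod, hdiv, hcond, ih (m / 10) (Nat.div_lt_self hmpos (by norm_num))]
      rw [pvS_step m hmpos]
      by_cases hp : pvP (m % 10) <;> simp [hp] <;> try ring
    · have : m = 0 := by omega
      subst this
      rw [dif_neg hm, pvS_zero, add_zero]

lemma altB_eq (num : Int) : sum_digits_divisible_by_3_alt num = pvS num.natAbs := by
  rw [sum_digits_divisible_by_3_alt]
  simp only [count_single]
  rw [pvCounts]
  have habs : ¬ (|num| < 0) := not_lt.mpr (abs_nonneg num)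
  rw [PySem.Int.toChars, if_neg habs]
  have htn : |num|.toNat = num.natAbs := by
    rw [Int.abs_eq_natAbs]; exact Int.toNat_natCast _
  rw [htn, Nat.toDigits]
  have hb : num.natAbs < 10 ^ (num.natAbs + 1) :=
    lt_of_lt_of_le (Nat.lt_pow_self (by norm_num))
      (Nat.pow_le_pow_right (by norm_num) (Nat.le_succ _))
  rw [core_sum (num.natAbs + 1) num.natAbs [] hb]
  simp

-- ===== VERDICT (by name: the statement is the Claim_ definition above) =====
theorem sum_digits_divisible_by_3_spec : Claim_equal_sum_digits_divisible_by_3 := by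
  intro num _
  unfold Spec_sum_digits_divisible_by_3 sum_digits_divisible_by_3
  rw [altB_eq]
  have habs : |num| = ((num.natAbs : Nat) : Int) := Int.abs_eq_natAbs num
  rw [habs, loopA_eq num.natAbs 0, zero_add]
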